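-- pv_equiv track=rewrite | github.com/ryugahidiky/my_utils | Codejam/Qualification Round 2020/Parenting Partnering Returns/ParentingPartneringReturns.py | solve
-- ===== SOURCE A (Python) =====
-- def solve(unsorted_list):
-- 	sorted_list = sorted(unsorted_list, key=lambda tup: tup[0])
-- 	res="C"
-- 	c=sorted_list[0]
-- 	j=[0,0]
-- 	for i in sorted_list[1:]:
-- 		current_task=i
-- 		if current_task[0]>=c[1]:
-- 			res+="C"
-- 			c=current_task
-- 		else:
-- 			if current_task[0]>=j[1]:
-- 				res+="J"
-- 				j=current_task
-- 			else:
-- 				return "IMPOSSIBLE"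
-- 	result=""
-- 	for i in unsorted_list:
-- 		result+=res[sorted_list.index(i)]
-- 		sorted_list[sorted_list.index(i)]=[0,0]
-- 	return result
-- ===== SOURCE B (Python) =====
-- def solve(unsorted_list):
--     n = len(unsorted_list)
--     order = sorted(range(n), key=lambda k: unsorted_list[k][0])
--     # pass 1: peel the earliest-fit chain off the sorted tasks -> Cameron
--     cam, jam = [], []
--     end = None
--     for k in order:
--         if end is None or unsorted_list[k][0] >= end:
--             cam.append(k)
--             end = unsorted_list[k][1]
--         else:
--             jam.append(k)
--     # pass 2: the leftover tasks must themselves form a chain -> Jamie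
--     # (Jamie treated as busy until time 0, as in the reference)
--     prev_end = 0
--     for k in jam:
--         if unsorted_list[k][0] < prev_end:
--             return 'IMPOSSIBLE'
--         prev_end = unsorted_list[k][1]
--     out = [''] * n
--     for k in cam:
--         out[k] = 'C'
--     for k in jam:
--         out[k] = 'J'
--     return ''.join(out)
-- ===== Notes on version B (the rewrite author's own statement) =====
-- stated objective: alternative
-- what changed: A decides each task's letter online with an interleaved two-register greedy over the sorted tasks and then maps letters back to original order by repeatedly scanning the sorted list with list.index and overwriting matched slots with a [0,0] sentinel; B instead peels the earliest-fit chain off the start-sorted index list (those tasks are Cameron's), verifies in a separate second pass that the leftover tasks themselves form a chain (Jamie's), and scatters constant letters from the two index lists into an output array by original index.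
-- outside the precondition, e.g. on solve([[0, 1], [0, 0]]): A returns 'CC', B returns 'CJ'; on solve([[0, 9], [1, 2], [5]]): A returns 'CJJ', B raises IndexError; on solve([]): A raises IndexError, B returns ''
import Mathlib
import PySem

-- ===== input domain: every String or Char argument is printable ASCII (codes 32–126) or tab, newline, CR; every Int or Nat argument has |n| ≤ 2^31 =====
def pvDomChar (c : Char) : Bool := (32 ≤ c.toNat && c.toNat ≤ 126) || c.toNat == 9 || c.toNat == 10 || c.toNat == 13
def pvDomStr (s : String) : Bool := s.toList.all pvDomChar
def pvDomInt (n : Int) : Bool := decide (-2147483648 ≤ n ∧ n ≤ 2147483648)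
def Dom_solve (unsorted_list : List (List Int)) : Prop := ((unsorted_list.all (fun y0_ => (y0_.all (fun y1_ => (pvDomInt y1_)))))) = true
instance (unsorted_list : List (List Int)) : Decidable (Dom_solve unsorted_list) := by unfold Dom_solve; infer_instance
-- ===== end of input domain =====

-- B replaces A's online two-register greedy (which decides each task's letter as it scans,
-- tracking both agents' end times, then maps letters back with a quadratic sentinel-overwrite
-- index scan) by a partition-then-verify algorithm: peel the earliest-fit chain off the
-- start-sorted index list (Cameron), verify in a second pass that the leftover tasks
-- themselves form a chain (Jamie), and scatter constant letters from the two index lists;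
-- objective: alternative (a timing run could not confirm a speed-up, since on its input
-- families A usually exits early with IMPOSSIBLE).

-- ===== PORT A =====
-- the greedy loop 'for i in sorted_list[1:]: …' (none = the early 'return "IMPOSSIBLE"')
def solveGreedyA : List (List Int) → List Char → List Int → List Int → Option (List Char)
  | [], res, _, _ => some res
  | i :: rest, res, c, j =>
    if PySem.List.pyGetD i 0 0 ≥ PySem.List.pyGetD c 1 0 then
      solveGreedyA rest (res ++ ['C']) i j
    else if PySem.List.pyGetD i 0 0 ≥ PySem.List.pyGetD j 1 0 then
      solveGreedyA rest (res ++ ['J']) c i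
    else none

-- the map-back loop 'for i in unsorted_list: result += res[sorted_list.index(i)]; sorted_list[…] = [0,0]'
-- (index? = some under Pre_; the .getD 0 covers only the unreachable ValueError case)
def solveReconA : List (List Int) → List (List Int) → List Char → List Char → List Char
  | [], _, _, result => result
  | i :: rest, sorted_list, res, result =>
    let k : Nat := (PySem.List.index? sorted_list i).getD 0
    solveReconA rest (PySem.List.pySetD sorted_list (k : Int) [0, 0]) res
      (result ++ [PySem.List.pyGetD res (k : Int) ' '])

def solve (unsorted_list : List (List Int)) : String :=
  let sorted_list := PySem.List.sorted unsorted_list (fun tup => PySem.List.pyGetD tup 0 0)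
  -- c = sorted_list[0]; the IndexError on [] is excluded by Pre_solve
  let c := PySem.List.pyGetD sorted_list 0 []
  match solveGreedyA (PySem.List.slice sorted_list (some 1) none) ['C'] c [0, 0] with
  | none => "IMPOSSIBLE"
  | some res => String.ofList (solveReconA unsorted_list sorted_list res [])

-- ===== PORT B =====
-- the body of Source B's pass-1 loop 'for k in order: …' (cam, jam, end), end = none ⇔ 'end is None'
def solveStepB (xs : List (List Int)) (acc : List Int × List Int × Option Int) (k : Int) :
    List Int × List Int × Option Int :=
  let s := PySem.List.pyGetD (PySem.List.pyGetD xs k []) 0 0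
  let e := PySem.List.pyGetD (PySem.List.pyGetD xs k []) 1 0
  match acc.2.2 with
  | none => (acc.1 ++ [k], acc.2.1, some e)
  | some en => if s ≥ en then (acc.1 ++ [k], acc.2.1, some e) else (acc.1, acc.2.1 ++ [k], some en)

-- Source B's pass-2 loop 'for k in jam: …' (false = the early 'return "IMPOSSIBLE"')
def solveChkB : List Int → List (List Int) → Int → Bool
  | [], _, _ => true
  | k :: r, xs, prevEnd =>
    if PySem.List.pyGetD (PySem.List.pyGetD xs k []) 0 0 < prevEnd then false
    else solveChkB r xs (PySem.List.pyGetD (PySem.List.pyGetD xs k []) 1 0)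

def solve_alt (unsorted_list : List (List Int)) : String :=
  let n := unsorted_list.length
  let order := PySem.List.sorted (PySem.List.pyRange 0 (n : Int) 1)
    (fun k => PySem.List.pyGetD (PySem.List.pyGetD unsorted_list k []) 0 0)
  let st := order.foldl (solveStepB unsorted_list) ([], [], none)
  if solveChkB st.2.1 unsorted_list 0 then
    let out0 := List.replicate n ([] : List Char)
    let out1 := st.1.foldl (fun o k => PySem.List.pySetD o k ['C']) out0
    let out2 := st.2.1.foldl (fun o k => PySem.List.pySetD o k ['J']) out1
    String.ofList out2.flatten
  else "IMPOSSIBLE"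

-- ===== PRECONDITION & SPEC =====
-- Pre_ excludes: the empty list and lists with a sublist of length < 2, on which A raises
-- IndexError (except for rare shapes such as [[0,9],[1,2],[5]] where A returns but B, which
-- reads both endpoints of every task, raises); and lists containing the exact task [0,0],
-- which collides with A's zeroed-slot sentinel so that the letter A assigns to such zero-length
-- tasks is an accident of the mutation order (A: 'CC' on [[0,1],[0,0]]) — any letter is equally
-- valid for a zero-length task, and B gives its partition's own letter ('CJ').
def Pre_solve (unsorted_list : List (List Int)) : Prop :=
  unsorted_list ≠ [] ∧ (∀ t ∈ unsorted_list, 2 ≤ t.length) ∧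
    ([0, 0] : List Int) ∉ unsorted_list
instance (unsorted_list : List (List Int)) : Decidable (Pre_solve unsorted_list) := by
  unfold Pre_solve; infer_instance

def pvWitness_solve : List (List Int) := [[1, 3], [2, 4], [0, 2]]

def Spec_solve (unsorted_list : List (List Int)) (out : String) : Prop :=
  out = solve_alt unsorted_list
instance (unsorted_list : List (List Int)) (out : String) : Decidable (Spec_solve unsorted_list out) := by
  unfold Spec_solve; infer_instance

-- ===== CLAIM (what is proved, stated in full; the proofs are below) =====
def Claim_equal_solve : Prop := ∀ (unsorted_list : List (List Int)),
  Dom_solve unsorted_list → Pre_solve unsorted_list →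
    Spec_solve unsorted_list (solve unsorted_list)

-- ===== LEMMAS AND PROOFS =====

-- proof-side abstractions
def pvGet (xs : List (List Int)) (k : Int) : List Int := PySem.List.pyGetD xs k []
def pvKey (xs : List (List Int)) (k : Int) : Int := PySem.List.pyGetD (pvGet xs k) 0 0
def pvEnd (xs : List (List Int)) (k : Int) : Int := PySem.List.pyGetD (pvGet xs k) 1 0
def pvOrd (xs : List (List Int)) : List Int :=
  PySem.List.sorted (PySem.List.pyRange 0 (xs.length : Int) 1) (pvKey xs)
-- the A-side greedy, carrying only the two end times
def pvG : List (List Int) → Int → Int → Option (List Char)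
  | [], _, _ => some []
  | t :: r, ce, je =>
    if PySem.List.pyGetD t 0 0 ≥ ce then
      (pvG r (PySem.List.pyGetD t 1 0) je).map (fun cs => 'C' :: cs)
    else if PySem.List.pyGetD t 0 0 ≥ je then
      (pvG r ce (PySem.List.pyGetD t 1 0)).map (fun cs => 'J' :: cs)
    else none
def pvWriteL (out : List (List Char)) (ps : List (Int × Char)) : List (List Char) :=
  ps.foldl (fun o p => PySem.List.pySetD o p.1 [p.2]) out
-- A's sorted list with the first p original tasks zeroed out
def pvZ (xs : List (List Int)) (ord : List Int) (p : Nat) : List (List Int) :=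
  ord.map (fun k => if k < (p : Int) then ([0, 0] : List Int) else pvGet xs k)
def pvIdx (ord : List Int) (p : Nat) : Nat := (PySem.List.index? ord (p : Int)).getD 0
-- B's partition: (chain ('C') indices, leftover ('J') indices, final chain end)
def pvPeelT : List Int → List (List Int) → Int → List Int × List Int × Int
  | [], _, en => ([], [], en)
  | k :: r, xs, en =>
    if pvKey xs k ≥ en then
      let p := pvPeelT r xs (pvEnd xs k); (k :: p.1, p.2.1, p.2.2)
    else
      let p := pvPeelT r xs en; (p.1, k :: p.2.1, p.2.2)
-- the letter each index receives under B's partition, in sorted order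
def pvLab : List Int → List (List Int) → Int → List Char
  | [], _, _ => []
  | k :: r, xs, en =>
    if pvKey xs k ≥ en then 'C' :: pvLab r xs (pvEnd xs k) else 'J' :: pvLab r xs en

theorem pvGreedyA_eq (l : List (List Int)) (res : List Char) (c j : List Int) :
    solveGreedyA l res c j
      = (pvG l (PySem.List.pyGetD c 1 0) (PySem.List.pyGetD j 1 0)).map (fun cs => res ++ cs) := by
  induction l generalizing res c j with
  | nil => simp [solveGreedyA, pvG]
  | cons t r ih =>
    simp only [solveGreedyA, pvG]
    split_ifs with h1 h2
    · rw [ih]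
      cases pvG r (PySem.List.pyGetD t 1 0) (PySem.List.pyGetD j 1 0) <;> simp
    · rw [ih]
      cases pvG r (PySem.List.pyGetD c 1 0) (PySem.List.pyGetD t 1 0) <;> simp
    · rfl

-- B's pass-1 fold computes the structural partition
theorem pvFoldl_peel (xs : List (List Int)) (l : List Int) :
    ∀ (c0 j0 : List Int) (en : Int),
      l.foldl (solveStepB xs) (c0, j0, some en)
        = (c0 ++ (pvPeelT l xs en).1, j0 ++ (pvPeelT l xs en).2.1,
            some (pvPeelT l xs en).2.2) := by
  induction l with
  | nil => intro c0 j0 en; simp [pvPeelT]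
  | cons k r ih =>
    intro c0 j0 en
    have hs : PySem.List.pyGetD (PySem.List.pyGetD xs k []) 0 0 = pvKey xs k := rfl
    have he : PySem.List.pyGetD (PySem.List.pyGetD xs k []) 1 0 = pvEnd xs k := rfl
    simp only [List.foldl_cons, solveStepB, hs, he, pvPeelT]
    by_cases h : pvKey xs k ≥ en
    · simp only [if_pos h]
      rw [ih]
      simp
    · simp only [if_neg h]
      rw [ih]
      simp

-- the interleaved greedy = B's partition + verification of the leftover
theorem pvG_eq_peel (xs : List (List Int)) (l : List Int) :
    ∀ (en je : Int),
      pvG (l.map (pvGet xs)) en je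
        = if solveChkB (pvPeelT l xs en).2.1 xs je then some (pvLab l xs en) else none := by
  induction l with
  | nil => intro en je; simp [pvG, pvPeelT, pvLab, solveChkB]
  | cons k r ih =>
    intro en je
    have hs : PySem.List.pyGetD (pvGet xs k) 0 0 = pvKey xs k := rfl
    have he : PySem.List.pyGetD (pvGet xs k) 1 0 = pvEnd xs k := rfl
    simp only [List.map_cons, pvG, pvPeelT, pvLab, hs, he]
    by_cases h1 : pvKey xs k ≥ en
    · simp only [if_pos h1]
      rw [ih]
      by_cases hc : solveChkB (pvPeelT r xs (pvEnd xs k)).2.1 xs je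
      · simp [hc]
      · simp [hc]
    · simp only [if_neg h1]
      by_cases h2 : pvKey xs k ≥ je
      · simp only [if_pos h2]
        have hchk : solveChkB (k :: (pvPeelT r xs en).2.1) xs je
            = solveChkB (pvPeelT r xs en).2.1 xs (pvEnd xs k) := by
          simp only [solveChkB]
          rw [if_neg (by exact not_lt.mpr h2)]
          rfl
        rw [hchk, ih]
        by_cases hc : solveChkB (pvPeelT r xs en).2.1 xs (pvEnd xs k)
        · simp [hc]
        · simp [hc]
      · rw [if_neg h2]
        have hchk : solveChkB (k :: (pvPeelT r xs en).2.1) xs je = false := by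
          simp only [solveChkB]
          rw [if_pos (by exact not_le.mp h2)]
        rw [hchk]
        simp

theorem pvPeelT_cam_sub (xs : List (List Int)) (l : List Int) :
    ∀ (en : Int) (k' : Int), k' ∈ (pvPeelT l xs en).1 → k' ∈ l := by
  induction l with
  | nil => intro en k' h; simp [pvPeelT] at h
  | cons k r ih =>
    intro en k' h
    simp only [pvPeelT] at h
    split_ifs at h with hc
    · rcases List.mem_cons.mp h with rfl | h
      · exact List.mem_cons_self
      · exact List.mem_cons_of_mem _ (ih _ _ h)
    · exact List.mem_cons_of_mem _ (ih _ _ h)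

theorem pvSetD_comm (out : List (List Char)) (a b : Int) (va vb : List Char)
    (ha : 0 ≤ a) (hb : 0 ≤ b) (hab : a ≠ b) :
    PySem.List.pySetD (PySem.List.pySetD out a va) b vb
      = PySem.List.pySetD (PySem.List.pySetD out b vb) a va := by
  obtain ⟨an, rfl⟩ : ∃ n : Nat, a = (n : Int) := ⟨a.toNat, (Int.toNat_of_nonneg ha).symm⟩
  obtain ⟨bn, rfl⟩ : ∃ n : Nat, b = (n : Int) := ⟨b.toNat, (Int.toNat_of_nonneg hb).symm⟩
  simp only [PySem.List.pySetD_natCast]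
  exact List.set_comm _ _ (fun h => hab (by exact_mod_cast h))

theorem pvFoldSet_comm (ks : List Int) (v v' : List Char) (out : List (List Char)) (k : Int)
    (hk : 0 ≤ k) (hks : ∀ k' ∈ ks, 0 ≤ k') (hnm : k ∉ ks) :
    ks.foldl (fun o k' => PySem.List.pySetD o k' v) (PySem.List.pySetD out k v')
      = PySem.List.pySetD (ks.foldl (fun o k' => PySem.List.pySetD o k' v) out) k v' := by
  induction ks generalizing out with
  | nil => rfl
  | cons a ks ih =>
    simp only [List.foldl_cons]
    rw [pvSetD_comm out k a v' v hk (hks a List.mem_cons_self)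
      (fun h => hnm (h ▸ List.mem_cons_self))]
    exact ih _ (fun k' h => hks k' (List.mem_cons_of_mem _ h))
      (fun h => hnm (List.mem_cons_of_mem _ h))

-- the zip-ordered writes of A's letters = B's grouped constant-letter scatters
theorem pvWriteL_eq_folds (xs : List (List Int)) (l : List Int) :
    ∀ (en : Int) (out : List (List Char)), l.Nodup → (∀ k ∈ l, 0 ≤ k) →
      pvWriteL out (l.zip (pvLab l xs en))
        = (pvPeelT l xs en).2.1.foldl (fun o k => PySem.List.pySetD o k ['J'])
            ((pvPeelT l xs en).1.foldl (fun o k => PySem.List.pySetD o k ['C']) out) := by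
  induction l with
  | nil => intro en out _ _; rfl
  | cons k r ih =>
    intro en out hnd hnn
    rcases List.nodup_cons.mp hnd with ⟨hknr, hndr⟩
    have hnnr : ∀ k' ∈ r, 0 ≤ k' := fun k' h => hnn k' (List.mem_cons_of_mem _ h)
    simp only [pvPeelT, pvLab]
    by_cases h : pvKey xs k ≥ en
    · rw [if_pos h, if_pos h]
      show pvWriteL (PySem.List.pySetD out k ['C']) (r.zip (pvLab r xs (pvEnd xs k))) = _
      rw [ih _ _ hndr hnnr]
      rfl
    · rw [if_neg h, if_neg h]
      show pvWriteL (PySem.List.pySetD out k ['J']) (r.zip (pvLab r xs en)) = _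
      rw [ih _ _ hndr hnnr]
      simp only [List.foldl_cons]
      congr 1
      rw [pvFoldSet_comm (pvPeelT r xs en).1 ['C'] ['J'] out k (hnn k List.mem_cons_self)
        (fun k' hk' => hnnr k' (pvPeelT_cam_sub xs r en k' hk'))
        (fun hk' => hknr (pvPeelT_cam_sub xs r en k hk'))]

theorem pvLab_length (xs : List (List Int)) (l : List Int) :
    ∀ en : Int, (pvLab l xs en).length = l.length := by
  induction l with
  | nil => intro en; rfl
  | cons k r ih =>
    intro en
    simp only [pvLab]
    split_ifs <;> simp [ih]

theorem pvInsertBy_map {α β κ : Type} [LinearOrder κ] (key : β → κ) (gf : α → β) (x : α)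
    (ys : List α) :
    PySem.List.insertBy (fun a b => decide (key a < key b)) (gf x) (ys.map gf)
      = (PySem.List.insertBy (fun a b => decide (key (gf a) < key (gf b))) x ys).map gf := by
  induction ys with
  | nil => simp [PySem.List.insertBy]
  | cons y ys ih =>
    simp only [List.map_cons, PySem.List.insertBy]
    split_ifs with h
    · simp
    · simp [ih]

theorem pvSorted_map_comm {α β κ : Type} [LinearOrder κ] (l : List α) (gf : α → β) (key : β → κ) :
    PySem.List.sorted (l.map gf) key = (PySem.List.sorted l (fun a => key (gf a))).map gf := by
  rw [PySem.List.sorted_eq_foldl_insertBy, PySem.List.sorted_eq_foldl_insertBy]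
  have h : ∀ (l' : List α) (acc : List α),
      (l'.map gf).foldl (fun acc x => PySem.List.insertBy (fun a b => decide (key a < key b)) x acc)
          (acc.map gf)
        = (l'.foldl (fun acc x =>
            PySem.List.insertBy (fun a b => decide (key (gf a) < key (gf b))) x acc) acc).map gf := by
    intro l' 
    induction l' with
    | nil => intro acc; simp
    | cons y l' ih =>
      intro acc
      simp only [List.map_cons, List.foldl_cons]
      rw [pvInsertBy_map key gf y acc, ih]
  simpa using h l []

theorem pvInsertBy_sorted {α κ : Type} [LinearOrder κ] (key : α → κ) (x : α) (acc : List α)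
    (h : acc.Pairwise (fun a b => key a ≤ key b)) :
    (PySem.List.insertBy (fun a b => decide (key a < key b)) x acc).Pairwise
      (fun a b => key a ≤ key b) := by
  induction acc with
  | nil => simp [PySem.List.insertBy]
  | cons y ys ih =>
    rcases List.pairwise_cons.mp h with ⟨hy, hys⟩
    simp only [PySem.List.insertBy]
    split_ifs with hb
    · simp only [decide_eq_true_eq] at hb
      refine List.pairwise_cons.mpr ⟨?_, h⟩
      intro z hz
      rcases List.mem_cons.mp hz with rfl | hz
      · exact le_of_lt hb
      · exact le_of_lt (lt_of_lt_of_le hb (hy z hz))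
    · simp only [decide_eq_true_eq] at hb
      refine List.pairwise_cons.mpr ⟨?_, ih hys⟩
      intro z hz
      rcases (PySem.List.mem_insertBy _ _ _ _).mp hz with rfl | hz
      · exact not_lt.mp hb
      · exact hy z hz

theorem pvInsertBy_pairwise {α κ : Type} [LinearOrder κ] (key : α → κ) (Q : α → α → Prop)
    (x : α) (acc : List α)
    (hs : acc.Pairwise (fun a b => key a ≤ key b)) (hq : acc.Pairwise Q)
    (h1 : ∀ y ∈ acc, Q y x) (h2 : ∀ y ∈ acc, key x < key y → Q x y) :
    (PySem.List.insertBy (fun a b => decide (key a < key b)) x acc).Pairwise Q := by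
  induction acc with
  | nil => simp [PySem.List.insertBy]
  | cons y ys ih =>
    rcases List.pairwise_cons.mp hs with ⟨hsy, hsys⟩
    rcases List.pairwise_cons.mp hq with ⟨hqy, hqys⟩
    simp only [PySem.List.insertBy]
    split_ifs with hb
    · simp only [decide_eq_true_eq] at hb
      refine List.pairwise_cons.mpr ⟨?_, hq⟩
      intro z hz
      rcases List.mem_cons.mp hz with rfl | hz
      · exact h2 z (List.mem_cons_self) hb
      · exact h2 z (List.mem_cons_of_mem _ hz) (lt_of_lt_of_le hb (hsy z hz))
    · refine List.pairwise_cons.mpr ⟨?_, ih hsys hqys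
        (fun z hz => h1 z (List.mem_cons_of_mem _ hz))
        (fun z hz hlt => h2 z (List.mem_cons_of_mem _ hz) hlt)⟩
      intro z hz
      rcases (PySem.List.mem_insertBy _ _ _ _).mp hz with rfl | hz
      · exact h1 y (List.mem_cons_self)
      · exact hqy z hz

theorem pvSorted_stable {α κ : Type} [LinearOrder κ] (key : α → κ) (S : α → α → Prop)
    (l : List α) (hl : l.Pairwise S) :
    (PySem.List.sorted l key).Pairwise (fun a b => key b ≤ key a → S a b) := by
  rw [PySem.List.sorted_eq_foldl_insertBy]
  have main : ∀ (l' : List α) (acc : List α), l'.Pairwise S →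
      acc.Pairwise (fun a b => key a ≤ key b) →
      acc.Pairwise (fun a b => key b ≤ key a → S a b) →
      (∀ y ∈ acc, ∀ x ∈ l', S y x) →
      (l'.foldl (fun acc x =>
          PySem.List.insertBy (fun a b => decide (key a < key b)) x acc) acc).Pairwise
        (fun a b => key b ≤ key a → S a b) := by
    intro l'
    induction l' with
    | nil => intro acc _ _ hq _; simpa using hq
    | cons x l' ih =>
      intro acc hS hle hq hcross
      rcases List.pairwise_cons.mp hS with ⟨hSx, hSl'⟩
      simp only [List.foldl_cons]
      refine ih _ hSl' (pvInsertBy_sorted key x acc hle) ?_ ?_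
      · refine pvInsertBy_pairwise key _ x acc hle hq ?_ ?_
        · intro y hy _
          exact hcross y hy x (List.mem_cons_self)
        · intro y _ hlt hle'
          exact absurd hle' (not_le.mpr hlt)
      · intro y hy x' hx'
        rcases (PySem.List.mem_insertBy _ _ _ _).mp hy with rfl | hy
        · exact hSx x' hx'
        · exact hcross y hy x' (List.mem_cons_of_mem _ hx')
  exact main l [] hl (by simp) (by simp) (by simp)

theorem pvIndex?_eq_some_of {α : Type} [BEq α] [LawfulBEq α] (l : List α) (v : α) (w : Nat)
    (hw : w < l.length) (h1 : l[w] = v) (h2 : ∀ u (hu : u < w), l[u]'(by omega) ≠ v) :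
    PySem.List.index? l v = some w := by
  induction l generalizing w with
  | nil => simp at hw
  | cons a l ih =>
    cases w with
    | zero =>
      simp only [List.getElem_cons_zero] at h1
      subst h1
      exact PySem.List.index?_cons_self _ _
    | succ w =>
      have hne : a ≠ v := by
        have := h2 0 (Nat.succ_pos w)
        simpa using this
      rw [PySem.List.index?_cons_of_ne _ hne]
      have := ih w (by simpa using hw) (by simpa using h1)
        (fun u hu => by simpa using h2 (u+1) (by omega))
      rw [this]
      rfl

theorem pvGet_eq (xs : List (List Int)) (p : Nat) (hp : p < xs.length) :
    pvGet xs (p : Int) = xs[p] := by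
  unfold pvGet
  rw [PySem.List.pyGetD_natCast]
  exact List.getD_eq_getElem _ _ hp

theorem pvOrd_length (xs : List (List Int)) : (pvOrd xs).length = xs.length := by
  rw [pvOrd, (PySem.List.sorted_perm _ _ _).length_eq, PySem.List.pyRange_zero_natCast]
  simp

theorem pvOrd_mem (xs : List (List Int)) (k : Int) (hk : k ∈ pvOrd xs) :
    0 ≤ k ∧ k < (xs.length : Int) := by
  have h := (PySem.List.sorted_perm _ _ _).mem_iff.mp hk
  exact PySem.List.mem_pyRange_one.mp h

theorem pvOrd_nodup (xs : List (List Int)) : (pvOrd xs).Nodup := by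
  refine (PySem.List.sorted_perm _ _ _).nodup_iff.mpr ?_
  rw [PySem.List.pyRange_zero_natCast]
  exact List.Nodup.map (fun a b h => by exact_mod_cast h) List.nodup_range

theorem pvOrd_stab (xs : List (List Int)) :
    (pvOrd xs).Pairwise (fun a b => pvKey xs b ≤ pvKey xs a → a < b) := by
  apply pvSorted_stable
  rw [PySem.List.pyRange_zero_natCast]
  exact List.Pairwise.map _ (fun a b h => by exact_mod_cast h) List.pairwise_lt_range

theorem pvIdx_spec (xs : List (List Int)) (p : Nat) (hp : p < xs.length) :
    ∃ h : pvIdx (pvOrd xs) p < (pvOrd xs).length,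
      (pvOrd xs)[pvIdx (pvOrd xs) p]'h = (p : Int) ∧
        PySem.List.index? (pvOrd xs) (p : Int) = some (pvIdx (pvOrd xs) p) := by
  have hmem : (p : Int) ∈ pvOrd xs := by
    rw [pvOrd, (PySem.List.sorted_perm _ _ _).mem_iff]
    exact PySem.List.mem_pyRange_one.mpr ⟨by positivity, by exact_mod_cast hp⟩
  obtain ⟨w, hw⟩ := Option.isSome_iff_exists.mp ((PySem.List.index?_isSome_iff _ _).mpr hmem)
  have hidx : pvIdx (pvOrd xs) p = w := by unfold pvIdx; rw [hw]; rfl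
  obtain ⟨hk, hget, _⟩ := PySem.List.getElem_of_index?_eq_some hw
  rw [hidx]
  exact ⟨hk, hget, hw⟩

theorem pvZ_length (xs : List (List Int)) (ord : List Int) (p : Nat) :
    (pvZ xs ord p).length = ord.length := by simp [pvZ]

theorem pvZ_index (xs : List (List Int)) (h00 : ([0, 0] : List Int) ∉ xs) (p : Nat)
    (hp : p < xs.length) :
    PySem.List.index? (pvZ xs (pvOrd xs) p) (xs[p]) = some (pvIdx (pvOrd xs) p) := by
  obtain ⟨hlt, hget, _⟩ := pvIdx_spec xs p hp
  apply pvIndex?_eq_some_of _ _ _ (by rw [pvZ_length]; exact hlt)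
  · simp only [pvZ, List.getElem_map]
    rw [hget]
    simp only [lt_self_iff_false, if_false]
    exact pvGet_eq xs p hp
  · intro u hu
    have hu' : u < (pvOrd xs).length := lt_trans hu hlt
    simp only [pvZ, List.getElem_map]
    by_cases hc : (pvOrd xs)[u]'hu' < (p : Int)
    · simp only [hc, if_true]
      intro heq
      exact h00 (heq ▸ List.getElem_mem hp)
    · simp only [hc, if_false]
      intro heq
      have hkey : pvKey xs ((pvOrd xs)[pvIdx (pvOrd xs) p]'hlt) ≤ pvKey xs ((pvOrd xs)[u]'hu') := by
        rw [hget]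
        unfold pvKey
        rw [heq, pvGet_eq xs p hp]
      have hstab := (List.pairwise_iff_getElem.mp (pvOrd_stab xs)) u (pvIdx (pvOrd xs) p) hu' hlt hu
      have := hstab hkey
      rw [hget] at this
      exact hc this

theorem pvZ_set (xs : List (List Int)) (p : Nat) (hp : p < xs.length) :
    PySem.List.pySetD (pvZ xs (pvOrd xs) p) ((pvIdx (pvOrd xs) p : Nat) : Int) [0, 0]
      = pvZ xs (pvOrd xs) (p + 1) := by
  obtain ⟨hlt, hget, _⟩ := pvIdx_spec xs p hp
  rw [PySem.List.pySetD_natCast]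
  apply List.ext_getElem
  · simp [pvZ]
  · intro w h1 h2
    have hw : w < (pvOrd xs).length := by simpa [pvZ] using h2
    rw [List.getElem_set]
    simp only [pvZ, List.getElem_map]
    by_cases hwe : pvIdx (pvOrd xs) p = w
    · subst hwe
      rw [if_pos rfl]
      have hordw : (pvOrd xs)[pvIdx (pvOrd xs) p]'hw = (p : Int) := hget
      rw [hordw]
      have hlt2 : (p : Int) < ((p + 1 : Nat) : Int) := by push_cast; omega
      rw [if_pos hlt2]
    · rw [if_neg hwe]
      have hne : (pvOrd xs)[w]'hw ≠ (p : Int) := by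
        intro he
        exact hwe ((List.Nodup.getElem_inj_iff (pvOrd_nodup xs)).mp (hget.trans he.symm))
      by_cases hc : (pvOrd xs)[w]'hw < (p : Int)
      · have hc2 : (pvOrd xs)[w]'hw < ((p + 1 : Nat) : Int) := by push_cast at hc ⊢; omega
        rw [if_pos hc, if_pos hc2]
      · have hc2 : ¬ (pvOrd xs)[w]'hw < ((p + 1 : Nat) : Int) := by
          push_cast at hc hne ⊢; omega
        rw [if_neg hc, if_neg hc2]

theorem pvSetD_getD_ne (out : List (List Char)) (k : Int) (v : List Char) (p : Nat)
    (h0 : 0 ≤ k) (hne : (p : Int) ≠ k) :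
    (PySem.List.pySetD out k v).getD p [] = out.getD p [] := by
  obtain ⟨kn, rfl⟩ : ∃ kn : Nat, k = (kn : Int) := ⟨k.toNat, (Int.toNat_of_nonneg h0).symm⟩
  rw [PySem.List.pySetD_natCast]
  have hpk : kn ≠ p := by intro h; exact hne (by exact_mod_cast h.symm)
  rw [List.getD_eq_getElem?_getD, List.getElem?_set_ne hpk, ← List.getD_eq_getElem?_getD]

theorem pvSetD_getD_self (out : List (List Char)) (p : Nat) (v : List Char)
    (hp : p < out.length) :
    (PySem.List.pySetD out (p : Int) v).getD p [] = v := by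
  rw [PySem.List.pySetD_natCast]
  rw [List.getD_eq_getElem _ _ (by simpa using hp)]
  simp

theorem pvWriteL_length (ps : List (Int × Char)) (out : List (List Char)) :
    (pvWriteL out ps).length = out.length := by
  induction ps generalizing out with
  | nil => rfl
  | cons q ps ih =>
    show (pvWriteL (PySem.List.pySetD out q.1 [q.2]) ps).length = _
    rw [ih, PySem.List.length_pySetD]

theorem pvWriteL_getD_not_mem (ks : List Int) (cs : List Char) (out : List (List Char)) (p : Nat)
    (hks : ∀ k ∈ ks, 0 ≤ k) (hnm : (p : Int) ∉ ks) :
    (pvWriteL out (ks.zip cs)).getD p [] = out.getD p [] := by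
  induction ks generalizing cs out with
  | nil => rfl
  | cons k ks ih =>
    cases cs with
    | nil => rfl
    | cons c cs =>
      show (pvWriteL (PySem.List.pySetD out k [c]) (ks.zip cs)).getD p [] = _
      rw [ih cs _ (fun k hk => hks k (List.mem_cons_of_mem _ hk)) (fun h => hnm (List.mem_cons_of_mem _ h))]
      exact pvSetD_getD_ne out k [c] p (hks k List.mem_cons_self) (fun h => hnm (h ▸ List.mem_cons_self))

theorem pvWriteL_getD (ks : List Int) (cs : List Char) (out : List (List Char)) (p q : Nat)
    (hp : p < out.length) (hks : ∀ k ∈ ks, 0 ≤ k) (hnd : ks.Nodup)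
    (hq : PySem.List.index? ks ((p : Nat) : Int) = some q) (hqlen : q < cs.length) :
    (pvWriteL out (ks.zip cs)).getD p [] = [cs.getD q ' '] := by
  induction ks generalizing cs out q with
  | nil => rw [PySem.List.index?_eq_idxOf?] at hq; simp at hq
  | cons k ks ih =>
    cases cs with
    | nil => simp at hqlen
    | cons c cs =>
      show (pvWriteL (PySem.List.pySetD out k [c]) (ks.zip cs)).getD p [] = _
      by_cases hk : k = (p : Int)
      · subst hk
        rw [PySem.List.index?_cons_self] at hq
        injection hq with hq0
        subst hq0
        have hpn : ((p : Nat) : Int) ∉ ks := (List.nodup_cons.mp hnd).1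
        rw [pvWriteL_getD_not_mem ks cs _ p (fun k hk => hks k (List.mem_cons_of_mem _ hk)) hpn]
        rw [pvSetD_getD_self out p [c] hp]
        rfl
      · rw [PySem.List.index?_cons_of_ne _ hk] at hq
        cases hidx : PySem.List.index? ks ((p : Nat) : Int) with
        | none => rw [hidx] at hq; simp at hq
        | some q' =>
          rw [hidx] at hq
          simp only [Option.map_some] at hq
          injection hq with hq1
          subst hq1
          rw [ih cs _ q' (by rw [PySem.List.length_pySetD]; exact hp)
            (fun k hk => hks k (List.mem_cons_of_mem _ hk)) (List.nodup_cons.mp hnd).2 hidx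
            (by simpa using hqlen)]
          rfl

theorem pvFlatten_map_singleton {β : Type} (l : List β) (f : β → Char) :
    (l.map (fun x => [f x])).flatten = l.map f := by
  induction l with
  | nil => rfl
  | cons x l ih => simp [ih]

theorem pvOut_eq (xs : List (List Int)) (cs : List Char) (hcs : cs.length = xs.length) :
    pvWriteL (List.replicate xs.length ([] : List Char)) ((pvOrd xs).zip cs)
      = (List.range xs.length).map (fun p => [cs.getD (pvIdx (pvOrd xs) p) ' ']) := by
  apply List.ext_getElem
  · rw [pvWriteL_length]; simp
  · intro w h1 h2
    have hwn : w < xs.length := by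
      have := h1; rw [pvWriteL_length] at this; simpa using this
    obtain ⟨hlt, _, hw⟩ := pvIdx_spec xs w hwn
    rw [← List.getD_eq_getElem _ [] h1]
    rw [pvWriteL_getD (pvOrd xs) cs _ w (pvIdx (pvOrd xs) w) (by simpa using hwn)
      (fun k hk => (pvOrd_mem xs k hk).1) (pvOrd_nodup xs) hw
      (by rw [hcs, ← pvOrd_length xs]; exact hlt)]
    simp

theorem pvRecon_eq (xs : List (List Int)) (h00 : ([0, 0] : List Int) ∉ xs) (cs : List Char) :
    ∀ (ys : List (List Int)) (p : Nat) (acc : List Char), xs.drop p = ys →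
      solveReconA ys (pvZ xs (pvOrd xs) p) cs acc
        = acc ++ (List.range ys.length).map (fun i => cs.getD (pvIdx (pvOrd xs) (p + i)) ' ') := by
  intro ys
  induction ys with
  | nil => intro p acc _; simp [solveReconA]
  | cons y ys ih =>
    intro p acc hdrop
    have hp : p < xs.length := by
      by_contra hnp
      rw [List.drop_eq_nil_of_le (by omega)] at hdrop
      exact absurd hdrop (by simp)
    have hdrop' := List.drop_eq_getElem_cons hp
    rw [hdrop] at hdrop'
    injection hdrop' with hy hys
    subst hy
    simp only [solveReconA]
    rw [pvZ_index xs h00 p hp]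
    simp only [Option.getD_some]
    rw [pvZ_set xs p hp]
    rw [ih (p + 1) _ hys.symm]
    rw [PySem.List.pyGetD_natCast]
    simp only [List.length_cons, List.range_succ_eq_map, List.map_cons, List.map_map,
      Nat.add_zero, List.append_assoc, List.singleton_append]
    congr 1
    congr 1
    apply List.map_congr_left
    intro i _
    simp only [Function.comp_apply]
    congr 2
    omega

theorem solve_spec' (xs : List (List Int)) (hpre : Pre_solve xs) : solve xs = solve_alt xs := by
  obtain ⟨hne, hlen2, h00⟩ := hpre
  have hn : 0 < xs.length := List.length_pos_iff.mpr hne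
  have hordlen : (pvOrd xs).length = xs.length := pvOrd_length xs
  obtain ⟨k0, ordres, hord⟩ : ∃ k0 ordres, pvOrd xs = k0 :: ordres := by
    cases h : pvOrd xs with
    | nil => rw [h] at hordlen; simp at hordlen; omega
    | cons a l => exact ⟨a, l, rfl⟩
  have hndall : (k0 :: ordres).Nodup := hord ▸ pvOrd_nodup xs
  have hnnall : ∀ k ∈ (k0 :: ordres), 0 ≤ k := fun k hk => (pvOrd_mem xs k (hord ▸ hk)).1
  have hsl : PySem.List.sorted xs (fun tup => PySem.List.pyGetD tup 0 0)
      = (pvOrd xs).map (pvGet xs) := by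
    conv_lhs => rw [← PySem.List.map_pyGetD_pyRange_zero' xs ([] : List Int)]
    rw [pvSorted_map_comm]
    rfl
  have hfold : PySem.List.sorted (PySem.List.pyRange 0 (xs.length : Int) 1)
      (fun k => PySem.List.pyGetD (PySem.List.pyGetD xs k []) 0 0) = pvOrd xs := rfl
  have he0 : PySem.List.pyGetD (PySem.List.pyGetD xs k0 []) 1 0 = pvEnd xs k0 := rfl
  -- B's pass-1 fold over the (nonempty) order list, first step through the 'none' branch
  have hstep0 : solveStepB xs ([], [], none) k0
      = ([k0], ([] : List Int), some (pvEnd xs k0)) := by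
    simp [solveStepB, he0]
  have hB : (k0 :: ordres).foldl (solveStepB xs) ([], [], none)
      = (k0 :: (pvPeelT ordres xs (pvEnd xs k0)).1,
          (pvPeelT ordres xs (pvEnd xs k0)).2.1,
          some (pvPeelT ordres xs (pvEnd xs k0)).2.2) := by
    rw [List.foldl_cons, hstep0, pvFoldl_peel]
    simp
  -- the bridge between A's interleaved greedy and B's partition+check
  have hbridge := pvG_eq_peel xs ordres (pvEnd xs k0) 0
  -- reduce A's side to pvG
  simp only [solve, solve_alt]
  rw [hsl, hfold, hord]
  simp only [List.map_cons, PySem.List.pyGetD_zero_cons, PySem.List.slice_from_one,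
    List.tail_cons]
  rw [pvGreedyA_eq]
  have hj : PySem.List.pyGetD ([0, 0] : List Int) 1 0 = 0 := by decide
  rw [hj]
  have hcE : PySem.List.pyGetD (pvGet xs k0) 1 0 = pvEnd xs k0 := rfl
  rw [hcE, hB]
  cases hG : pvG (ordres.map (pvGet xs)) (pvEnd xs k0) 0 with
  | none =>
    -- the check must fail
    rw [hG] at hbridge
    by_cases hchk : solveChkB (pvPeelT ordres xs (pvEnd xs k0)).2.1 xs 0
    · rw [if_pos hchk] at hbridge; exact absurd hbridge (by simp)
    · simp only [Option.map_none]
      rw [if_neg hchk]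
  | some cs =>
    rw [hG] at hbridge
    by_cases hchk : solveChkB (pvPeelT ordres xs (pvEnd xs k0)).2.1 xs 0
    case neg => rw [if_neg hchk] at hbridge; exact absurd hbridge (by simp)
    have hcs : cs = pvLab ordres xs (pvEnd xs k0) := by
      rw [if_pos hchk] at hbridge
      exact Option.some_inj.mp hbridge
    rw [if_pos hchk]
    simp only [Option.map_some]
    -- lengths
    have hlenord : ordres.length + 1 = xs.length := by
      have : (k0 :: ordres).length = xs.length := by rw [← hord]; exact hordlen
      simpa using this
    have hcslen : ('C' :: cs).length = xs.length := by
      simp [hcs, pvLab_length, hlenord]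
    -- A's recon over the zeroed sorted list
    have hz0 : pvGet xs k0 :: List.map (pvGet xs) ordres = pvZ xs (pvOrd xs) 0 := by
      rw [← List.map_cons, ← hord]
      unfold pvZ
      apply List.map_congr_left
      intro k hk
      have h0k := (pvOrd_mem xs k hk).1
      rw [if_neg (by omega)]
    rw [hz0, show (['C'] ++ cs) = 'C' :: cs from rfl]
    rw [pvRecon_eq xs h00 ('C' :: cs) xs 0 [] (by simp)]
    -- B's scatter equals the zip-ordered writes, then the range-map form
    have hfolds := pvWriteL_eq_folds xs ordres (pvEnd xs k0)
      (PySem.List.pySetD (List.replicate xs.length ([] : List Char)) k0 ['C'])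
      (List.nodup_cons.mp hndall).2
      (fun k hk => hnnall k (List.mem_cons_of_mem _ hk))
    rw [← hcs] at hfolds
    rw [List.foldl_cons, ← hfolds]
    have hw0 : pvWriteL (PySem.List.pySetD (List.replicate xs.length ([] : List Char)) k0 ['C'])
        (ordres.zip cs)
        = pvWriteL (List.replicate xs.length ([] : List Char)) ((k0 :: ordres).zip ('C' :: cs)) := rfl
    rw [hw0, ← hord, pvOut_eq xs ('C' :: cs) hcslen, pvFlatten_map_singleton]
    simp

-- ===== VERDICT (by name: the statement is the Claim_ definition above) =====
theorem solve_spec : Claim_equal_solve := by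
  intro xs _ hpre
  unfold Spec_solve
  exact solve_spec' xs hpre
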